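-- pv_equiv track=rewrite | github.com/4ak5ra/4ak5ra.github.io | scripts/rename_and_update.py | update_front_matter
-- ===== SOURCE A (Python) =====
-- def update_front_matter(content, new_title):
--     """
--     更新Markdown文件中的front matter的title字段。
--     front matter格式：
--     ---
--     title: 旧标题
--     tags: [...]
--     ...
--     ---
--     """
--     # 使用正则匹配front matter中的title行
--     # 注意：front matter可能包含多行，我们只替换title行
--     lines = content.split('\n')
--     in_front_matter = False
--     front_matter_end = -1
--     for i, line in enumerate(lines):
--         if line.strip() == '---':
--             if in_front_matter:
--                 front_matter_end = i
--                 break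
--             else:
--                 in_front_matter = True
--                 continue
--         if in_front_matter and line.startswith('title:'):
--             # 找到title行，进行替换
--             # 保持缩进和格式
--             indent = len(line) - len(line.lstrip())
--             lines[i] = ' ' * indent + f'title: {new_title}'
--             break
--
--     # 如果front matter中没有title，则添加（这种情况不应该发生，但以防万一）
--     if in_front_matter and front_matter_end != -1:
--         # 检查是否已经替换了title
--         title_found = any(line.strip().startswith('title:') for line in lines[:front_matter_end])
--         if not title_found:
--             # 在front matter结束前插入title行
--             lines.insert(front_matter_end - 1, f'title: {new_title}')
--
--     return '\n'.join(lines)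
-- ===== SOURCE B (Python) =====
-- def update_front_matter(content, new_title):
--     """Offset-based single pass over the raw string: no line list is ever built.
--     Walks newline positions with str.find, tracks the open-delimiter state, the
--     previous line's start offset and an incremental 'title seen' flag (which
--     fuses A's separate any() pass into the scan), and produces the result as at
--     most three slices of the original string."""
--     n = len(content)
--     pos = 0            # start offset of the current line
--     prev = 0           # start offset of the previous line
--     opened = False     # an opening '---' line has been passed
--     seen = False       # some earlier line satisfies line.strip().startswith('title:')
--     while True:
--         nl = content.find('\n', pos)
--         end = n if nl == -1 else nl
--         line = content[pos:end]
--         if line.strip() == '---':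
--             if opened:
--                 # closing delimiter reached without replacing a title line
--                 if seen:
--                     return content
--                 return content[:prev] + 'title: ' + new_title + '\n' + content[prev:]
--             opened = True
--         elif opened and line.startswith('title:'):
--             return content[:pos] + 'title: ' + new_title + content[end:]
--         seen = seen or line.strip().startswith('title:')
--         if nl == -1:
--             return content
--         prev = pos
--         pos = nl + 1
-- ===== Notes on version B (the rewrite author's own statement) =====
-- stated objective: alternative
-- what changed: B never builds a list of lines: it walks the raw string by newline offsets (str.find), keeps the previous line's start offset and an incremental 'title seen' flag that fuses A's separate any() pass into the single scan, and assembles the result from at most three slices of the original string instead of A's split/mutate/join.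
import Mathlib
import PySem

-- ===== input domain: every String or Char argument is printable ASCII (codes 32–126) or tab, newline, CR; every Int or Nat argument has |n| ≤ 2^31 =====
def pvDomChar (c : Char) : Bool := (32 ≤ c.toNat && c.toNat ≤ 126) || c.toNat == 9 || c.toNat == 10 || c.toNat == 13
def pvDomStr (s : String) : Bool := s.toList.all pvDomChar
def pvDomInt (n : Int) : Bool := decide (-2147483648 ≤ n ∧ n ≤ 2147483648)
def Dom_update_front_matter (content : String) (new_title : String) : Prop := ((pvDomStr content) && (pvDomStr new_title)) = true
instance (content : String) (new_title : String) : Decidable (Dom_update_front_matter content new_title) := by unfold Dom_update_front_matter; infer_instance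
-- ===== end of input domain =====

-- B walks the raw string by newline offsets (str.find) in one pass with an incremental
-- 'title seen' flag and assembles the result from slices of the original string; A splits
-- into a line list, runs a flag-driven loop with in-place mutation plus a separate any()
-- pass, and rejoins. Same return value on every input.

-- ===== PORT A =====
-- A's for-loop over enumerate(lines) with its in_front_matter flag, in-place replacement and two
-- break sites; returns (lines-after-loop, in_front_matter, front_matter_end).
def aLoop (nt : String) : Nat → Bool → List String → List String × Bool × Int
  | _, infm, [] => ([], infm, -1)
  | i, infm, l :: rest =>
    if PySem.Str.strip l == "---" then
      if infm then
        (l :: rest, infm, (i : Int))          -- front_matter_end = i; break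
      else
        let r := aLoop nt (i + 1) true rest   -- in_front_matter = True; continue
        (l :: r.1, r.2.1, r.2.2)
    else if infm && PySem.Str.startswith l "title:" then
      let indent := PySem.Str.len l - PySem.Str.len (PySem.Str.lstrip l)
      ((String.ofList (List.replicate indent.toNat ' ') ++ ("title: " ++ nt)) :: rest, infm, -1)  -- replace; break (' '*indent for indent ≥ 0)
    else
      let r := aLoop nt (i + 1) infm rest
      (l :: r.1, r.2.1, r.2.2)

def update_front_matter (content : String) (new_title : String) : String :=
  let lines := (PySem.Str.split? content "\n").getD []   -- content.split('\n'); sep ≠ "" so split? = some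
  let r := aLoop new_title 0 false lines
  if r.2.1 ∧ r.2.2 ≠ -1 then
    if (PySem.List.slice r.1 none (some r.2.2)).any
        (fun l => PySem.Str.startswith (PySem.Str.strip l) "title:") then
      PySem.Str.join "\n" r.1
    else
      PySem.Str.join "\n" (PySem.List.insert r.1 (r.2.2 - 1) ("title: " ++ new_title))
  else
    PySem.Str.join "\n" r.1

-- ===== PORT B =====
-- Source B's while loop over the raw string. The port carries rest = cs.drop pos and computes
-- nl = content.find('\n', pos) as pos + find(rest, '\n') (exact: PySem.Chars.findFrom_natCast);
-- content[pos:end] is rest.take (nl - pos), content[:j] / content[j:] are cs.take j / cs.drop j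
-- (j ≥ 0).  In the two returning '---' branches Python never reaches the 'seen' update, so the
-- port updates seen only on the two advancing paths, as Python does.
def bLoop (nt cs : List Char) (pos prev : Nat) (opened seen : Bool) (rest : List Char) : List Char :=
  let k := PySem.Chars.find rest ['\n']                     -- nl = content.find('\n', pos) = pos + k (or -1)
  let line := if k = -1 then rest else rest.take k.toNat    -- line = content[pos:end]
  if PySem.Chars.strip line == "---".toList then
    if opened then
      if seen then cs
      else cs.take prev ++ ("title: ".toList ++ nt ++ ['\n']) ++ cs.drop prev
    else if _h : k = -1 then cs
    else bLoop nt cs (pos + k.toNat + 1) pos true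
      (seen || PySem.Chars.startswith (PySem.Chars.strip line) "title:".toList)
      (rest.drop (k.toNat + 1))
  else if opened && PySem.Chars.startswith line "title:".toList then
    cs.take pos ++ ("title: ".toList ++ nt) ++ (if k = -1 then [] else rest.drop k.toNat)
  else if _h : k = -1 then cs
  else bLoop nt cs (pos + k.toNat + 1) pos opened
    (seen || PySem.Chars.startswith (PySem.Chars.strip line) "title:".toList)
    (rest.drop (k.toNat + 1))
termination_by rest.length
decreasing_by
  all_goals
    have hin : ['\n'] <:+: rest := (PySem.Chars.find_ne_neg_one_iff rest ['\n']).mp (by assumption)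
    have hlen : 1 ≤ rest.length := by simpa using hin.length_le
    simp only [List.length_drop]
    omega

def update_front_matter_alt (content : String) (new_title : String) : String :=
  String.ofList (bLoop new_title.toList content.toList 0 0 false false content.toList)

-- ===== PRECONDITION & SPEC =====
def Spec_update_front_matter (content : String) (new_title : String) (out : String) : Prop := out = update_front_matter_alt content new_title
instance (content : String) (new_title : String) (out : String) : Decidable (Spec_update_front_matter content new_title out) := by unfold Spec_update_front_matter; infer_instance

-- ===== CLAIM (what is proved, stated in full; the proofs are below) =====
def Claim_equal_update_front_matter : Prop := ∀ (content : String) (new_title : String), Dom_update_front_matter content new_title → Spec_update_front_matter content new_title (update_front_matter content new_title)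

-- ===== LEMMAS AND PROOFS =====

def isDash (l : String) : Bool := PySem.Str.strip l == "---"
def isTitle (l : String) : Bool := PySem.Str.startswith l "title:"
def tS (l : String) : Bool := PySem.Str.startswith (PySem.Str.strip l) "title:"

-- ---------- A-side loop lemmas ----------

lemma aLoop_skip_false (nt : String) (p ls : List String) (i : Nat)
    (h : ∀ l ∈ p, isDash l = false) :
    aLoop nt i false (p ++ ls) =
      ((p ++ (aLoop nt (i + p.length) false ls).1, (aLoop nt (i + p.length) false ls).2)) := by
  induction p generalizing i with
  | nil => simp
  | cons a as ih =>
    have ha : isDash a = false := h a (by simp)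
    simp only [List.cons_append, aLoop]
    rw [if_neg (by simpa [isDash] using ha)]
    simp only [Bool.false_and, Bool.false_eq_true, if_false]
    rw [ih (i + 1) (fun l hl => h l (by simp [hl]))]
    have h2 : i + 1 + as.length = i + (as.length + 1) := by omega
    simp only [List.length_cons, h2]

lemma aLoop_open (nt : String) (d : String) (ls : List String) (i : Nat) (hd : isDash d = true) :
    aLoop nt i false (d :: ls) =
      (d :: (aLoop nt (i + 1) true ls).1, (aLoop nt (i + 1) true ls).2) := by
  simp only [aLoop]
  rw [if_pos (by simpa [isDash] using hd)]
  simp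

lemma aLoop_skip_true (nt : String) (q ls : List String) (i : Nat)
    (h : ∀ l ∈ q, isDash l = false ∧ isTitle l = false) :
    aLoop nt i true (q ++ ls) =
      ((q ++ (aLoop nt (i + q.length) true ls).1, (aLoop nt (i + q.length) true ls).2)) := by
  induction q generalizing i with
  | nil => simp
  | cons a as ih =>
    obtain ⟨ha1, ha2⟩ := h a (by simp)
    simp only [List.cons_append, aLoop]
    rw [if_neg (by simpa [isDash] using ha1)]
    rw [if_neg (by simp only [isTitle] at ha2; simp at ha2 ⊢; exact ha2)]
    rw [ih (i + 1) (fun l hl => h l (by simp [hl]))]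
    have h2 : i + 1 + as.length = i + (as.length + 1) := by omega
    simp only [List.length_cons, h2]

lemma aLoop_close (nt : String) (x : String) (ls : List String) (i : Nat) (hx : isDash x = true) :
    aLoop nt i true (x :: ls) = (x :: ls, true, (i : Int)) := by
  simp only [aLoop]
  rw [if_pos (by simpa [isDash] using hx)]
  simp

lemma lstrip_of_title (x : String) (hx : isTitle x = true) :
    PySem.Str.lstrip x = x := by
  simp only [isTitle, PySem.Str.startswith_eq, PySem.Chars.startswith_iff] at hx
  obtain ⟨t, ht⟩ := hx
  apply String.toList_inj.mp
  rw [PySem.Str.toList_lstrip, ← ht]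
  show PySem.Chars.lstrip (['t','i','t','l','e',':'] ++ t) = _
  simp [PySem.Chars.lstrip, show PySem.Chars.isspace 't' = false from rfl]

lemma aLoop_title (nt : String) (x : String) (ls : List String) (i : Nat)
    (hd : isDash x = false) (ht : isTitle x = true) :
    aLoop nt i true (x :: ls) = (("title: " ++ nt) :: ls, true, -1) := by
  simp only [aLoop]
  rw [if_neg (by simpa [isDash] using hd)]
  simp only [Bool.true_and]
  rw [if_pos (by simp only [isTitle] at ht; exact ht)]
  rw [lstrip_of_title x ht]
  simp

-- ---------- line-level intermediate for B ----------

-- lineB nt all i opened seen rem : Source B's scan expressed on the line list 'all' of the content,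
-- 'rem' being the lines not yet processed (= all.drop i); returns the final string.
def lineB (nt : String) (all : List String) : Nat → Bool → Bool → List String → String
  | _, _, _, [] => PySem.Str.join "\n" all
  | i, opened, seen, l :: rest =>
    if isDash l then
      if opened then
        if seen then PySem.Str.join "\n" all
        else PySem.Str.join "\n" (all.take (i-1) ++ ("title: " ++ nt) :: all.drop (i-1))
      else if rest.isEmpty then PySem.Str.join "\n" all
      else lineB nt all (i+1) true (seen || tS l) rest
    else if opened && isTitle l then
      PySem.Str.join "\n" (all.take i ++ ("title: " ++ nt) :: all.drop (i+1))
    else if rest.isEmpty then PySem.Str.join "\n" all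
    else lineB nt all (i+1) opened (seen || tS l) rest

lemma lineB_skip_out (nt : String) (all : List String) (p rem : List String) (i : Nat)
    (seen : Bool) (hp : ∀ l ∈ p, isDash l = false) (hrem : rem ≠ []) :
    lineB nt all i false seen (p ++ rem) =
      lineB nt all (i + p.length) false (seen || p.any tS) rem := by
  induction p generalizing i seen with
  | nil => simp
  | cons a as ih =>
    have ha : isDash a = false := hp a (by simp)
    have hne : ((as ++ rem).isEmpty) = false := by
      simp only [List.isEmpty_eq_false_iff, ne_eq, List.append_eq_nil_iff, not_and]
      intro _; exact hrem
    rw [List.cons_append, lineB, if_neg (by simp [ha]), if_neg (by simp), if_neg (by simp [hne])]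
    rw [ih (i+1) (seen || tS a) (fun l hl => hp l (by simp [hl]))]
    have h2 : i + 1 + as.length = i + (as.length + 1) := by omega
    simp [h2, Bool.or_assoc]

lemma lineB_out_nil (nt : String) (all : List String) (p : List String) (i : Nat)
    (seen : Bool) (hp : ∀ l ∈ p, isDash l = false) :
    lineB nt all i false seen p = PySem.Str.join "\n" all := by
  induction p generalizing i seen with
  | nil => rfl
  | cons a as ih =>
    have ha : isDash a = false := hp a (by simp)
    rw [lineB, if_neg (by simp [ha]), if_neg (by simp)]
    by_cases h0 : as.isEmpty
    · rw [if_pos h0]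
    · rw [if_neg h0]
      exact ih (i+1) (seen || tS a) (fun l hl => hp l (by simp [hl]))

lemma lineB_skip_in (nt : String) (all : List String) (q rem : List String) (i : Nat)
    (seen : Bool) (hq : ∀ l ∈ q, isDash l = false ∧ isTitle l = false) (hrem : rem ≠ []) :
    lineB nt all i true seen (q ++ rem) =
      lineB nt all (i + q.length) true (seen || q.any tS) rem := by
  induction q generalizing i seen with
  | nil => simp
  | cons a as ih =>
    obtain ⟨ha1, ha2⟩ := hq a (by simp)
    have hne : ((as ++ rem).isEmpty) = false := by
      simp only [List.isEmpty_eq_false_iff, ne_eq, List.append_eq_nil_iff, not_and]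
      intro _; exact hrem
    rw [List.cons_append, lineB, if_neg (by simp [ha1]), if_neg (by simp [ha2]), if_neg (by simp [hne])]
    rw [ih (i+1) (seen || tS a) (fun l hl => hq l (by simp [hl]))]
    have h2 : i + 1 + as.length = i + (as.length + 1) := by omega
    simp [h2, Bool.or_assoc]

lemma lineB_in_nil (nt : String) (all : List String) (q : List String) (i : Nat)
    (seen : Bool) (hq : ∀ l ∈ q, isDash l = false ∧ isTitle l = false) :
    lineB nt all i true seen q = PySem.Str.join "\n" all := by
  induction q generalizing i seen with
  | nil => rfl
  | cons a as ih =>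
    obtain ⟨ha1, ha2⟩ := hq a (by simp)
    rw [lineB, if_neg (by simp [ha1]), if_neg (by simp [ha2])]
    by_cases h0 : as.isEmpty
    · rw [if_pos h0]
    · rw [if_neg h0]
      exact ih (i+1) (seen || tS a) (fun l hl => hq l (by simp [hl]))

-- ---------- Step 2: A's loop-plus-fixup equals lineB ----------

lemma core2 (nt : String) (lines : List String) :
    (let r := aLoop nt 0 false lines
     if r.2.1 ∧ r.2.2 ≠ -1 then
       if (PySem.List.slice r.1 none (some r.2.2)).any
           (fun l => PySem.Str.startswith (PySem.Str.strip l) "title:") then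
         PySem.Str.join "\n" r.1
       else
         PySem.Str.join "\n" (PySem.List.insert r.1 (r.2.2 - 1) ("title: " ++ nt))
     else PySem.Str.join "\n" r.1) =
    lineB nt lines 0 false false lines := by
  have htS : (fun l => PySem.Str.startswith (PySem.Str.strip l) "title:") = tS := rfl
  have hsplit := (List.takeWhile_append_dropWhile (p := fun l => !isDash l) (l := lines)).symm
  have hp : ∀ l ∈ lines.takeWhile (fun l => !isDash l), isDash l = false := by
    intro l hl; simpa using List.mem_takeWhile_imp hl
  cases h0 : lines.dropWhile (fun l => !isDash l) with
  | nil =>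
    have hl : lines = lines.takeWhile (fun l => !isDash l) := by
      conv_lhs => rw [hsplit, h0]
      simp
    have hp' : ∀ l ∈ lines, isDash l = false := fun l hl' => hp l (hl ▸ hl')
    have ha : aLoop nt 0 false lines = (lines, false, -1) := by
      conv_lhs => rw [hl]
      have := aLoop_skip_false nt (lines.takeWhile (fun l => !isDash l)) [] 0 hp
      simp only [List.append_nil] at this
      rw [this]
      simp [aLoop, ← hl]
    rw [lineB_out_nil nt lines lines 0 false hp']
    simp only [ha]
    simp
  | cons d rest =>
    have hd : isDash d = true := by
      have hne : lines.dropWhile (fun l => !isDash l) ≠ [] := by rw [h0]; simp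
      have := List.head_dropWhile_not (fun l => !isDash l) hne
      simp only [h0, List.head_cons] at this
      simpa using this
    have hlines : lines = lines.takeWhile (fun l => !isDash l) ++ d :: rest := by
      conv_lhs => rw [hsplit, h0]
    generalize hpdef : lines.takeWhile (fun l => !isDash l) = p at hp hlines
    have hAr : aLoop nt 0 false lines =
        (p ++ d :: (aLoop nt (p.length + 1) true rest).1, (aLoop nt (p.length + 1) true rest).2) := by
      conv_lhs => rw [hlines]
      rw [aLoop_skip_false nt p (d :: rest) 0 hp]
      rw [aLoop_open nt d rest (0 + p.length) hd]
      simp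
    have hBr : lineB nt lines 0 false false lines =
        (if rest.isEmpty then PySem.Str.join "\n" lines
         else lineB nt lines (p.length + 1) true ((false || p.any tS) || tS d) rest) := by
      have estep : lineB nt lines 0 false false lines
          = lineB nt lines 0 false false (p ++ d :: rest) := by rw [← hlines]
      rw [estep, lineB_skip_out nt lines p (d :: rest) 0 false hp (by simp)]
      rw [lineB, if_pos (by simp [hd]), if_neg (by simp)]
      simp
    have hq : ∀ l ∈ rest.takeWhile (fun l => !isDash l && !isTitle l), isDash l = false ∧ isTitle l = false := by
      intro l hl
      have := List.mem_takeWhile_imp hl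
      constructor <;> simp_all
    have hsplit2 := (List.takeWhile_append_dropWhile (p := fun l => !isDash l && !isTitle l) (l := rest)).symm
    cases h1 : rest.dropWhile (fun l => !isDash l && !isTitle l) with
    | nil =>
      have hqq : ∀ l ∈ rest, isDash l = false ∧ isTitle l = false := by
        intro l hl
        apply hq
        have : rest = rest.takeWhile (fun l => !isDash l && !isTitle l) := by
          conv_lhs => rw [hsplit2, h1]
          simp
        rwa [← this]
      have hA2 : aLoop nt (p.length + 1) true rest = (rest, true, -1) := by
        have := aLoop_skip_true nt rest [] (p.length + 1) hqq
        simp only [List.append_nil] at this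
        rw [this]
        simp [aLoop]
      have hAr' : aLoop nt 0 false lines = (lines, true, -1) := by
        rw [hAr, hA2, ← hlines]
      rw [hBr]
      by_cases hre : rest.isEmpty
      · rw [if_pos hre]
        simp only [hAr']
        simp
      · rw [if_neg hre]
        rw [lineB_in_nil nt lines rest (p.length + 1) _ hqq]
        simp only [hAr']
        simp
    | cons x r2 =>
      have hne2 : rest.dropWhile (fun l => !isDash l && !isTitle l) ≠ [] := by rw [h1]; simp
      have hxp := List.head_dropWhile_not (fun l => !isDash l && !isTitle l) hne2
      simp only [h1, List.head_cons] at hxp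
      have hrest : rest = rest.takeWhile (fun l => !isDash l && !isTitle l) ++ x :: r2 := by
        conv_lhs => rw [hsplit2, h1]
      generalize hqdef : rest.takeWhile (fun l => !isDash l && !isTitle l) = q at hq hrest
      have hre : rest.isEmpty = false := by
        rw [hrest]; simp
      have hA3 : aLoop nt (p.length + 1) true rest =
          (q ++ (aLoop nt (p.length + 1 + q.length) true (x :: r2)).1,
           (aLoop nt (p.length + 1 + q.length) true (x :: r2)).2) := by
        conv_lhs => rw [hrest]
        rw [aLoop_skip_true nt q (x :: r2) (p.length + 1) hq]
      have hB3 : lineB nt lines 0 false false lines =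
          lineB nt lines (p.length + 1 + q.length) true
            (((false || p.any tS) || tS d) || q.any tS) (x :: r2) := by
        rw [hBr, if_neg (by simp [hre])]
        have estep2 : lineB nt lines (p.length + 1) true ((false || p.any tS) || tS d) rest
            = lineB nt lines (p.length + 1) true ((false || p.any tS) || tS d) (q ++ x :: r2) := by
          rw [← hrest]
        rw [estep2, lineB_skip_in nt lines q (x :: r2) (p.length + 1) _ hq (by simp)]
      have hlen : lines.length = p.length + 1 + q.length + 1 + r2.length := by
        rw [hlines, hrest]
        simp only [List.length_append, List.length_cons]
        omega
      have htakec : lines.take (p.length + 1 + q.length) = p ++ d :: q := by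
        rw [hlines, hrest]
        have h4 : p ++ d :: (q ++ x :: r2) = (p ++ d :: q) ++ x :: r2 := by simp
        rw [h4, List.take_left' (by simp; omega)]
      by_cases hdx : isDash x = true
      · -- x closes the front matter
        have hA4 : aLoop nt 0 false lines = (lines, true, ((p.length + 1 + q.length : Nat) : Int)) := by
          rw [hAr, hA3, aLoop_close nt x r2 (p.length + 1 + q.length) hdx]
          dsimp only
          rw [hlines, hrest]
        have hB4 : lineB nt lines 0 false false lines =
            (if ((((false || p.any tS) || tS d) || q.any tS) : Bool) then PySem.Str.join "\n" lines
             else PySem.Str.join "\n" (lines.take (p.length + 1 + q.length - 1) ++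
               ("title: " ++ nt) :: lines.drop (p.length + 1 + q.length - 1))) := by
          rw [hB3, lineB, if_pos (by simp [hdx]), if_pos (by simp)]
        have hguard : PySem.List.slice lines none (some ((p.length + 1 + q.length : Nat) : Int)) = p ++ d :: q := by
          rw [PySem.List.slice_to_natCast, htakec]
        simp only [hA4]
        rw [if_pos (show True ∧ ((p.length + 1 + q.length : Nat) : Int) ≠ -1 from ⟨trivial, by omega⟩)]
        rw [hguard, hB4, htS]
        have hanyeq : ((p ++ d :: q).any tS) = (((false || p.any tS) || tS d) || q.any tS) := by
          simp [List.any_append, List.any_cons, Bool.or_assoc]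
        rw [hanyeq]
        by_cases hg : ((((false || p.any tS) || tS d) || q.any tS) : Bool) = true
        · rw [if_pos hg, if_pos hg]
        · rw [if_neg hg, if_neg hg]
          have h7 : ((p.length + 1 + q.length : Nat) : Int) - 1 = ((p.length + q.length : Nat) : Int) := by
            push_cast; ring
          rw [h7]
          have h8 : p.length + q.length ≤ lines.length := by omega
          rw [PySem.List.insert_natCast lines _ _ h8]
          have h9 : p.length + 1 + q.length - 1 = p.length + q.length := by omega
          rw [h9]
      · -- x is a title line
        have hdx' : isDash x = false := by simpa using hdx
        have htx : isTitle x = true := by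
          simp only [Bool.and_eq_false_iff, Bool.not_eq_false'] at hxp
          rcases hxp with h | h
          · exact absurd h (by simp [hdx'])
          · simpa using h
        have hA4 : aLoop nt 0 false lines = (p ++ d :: (q ++ ("title: " ++ nt) :: r2), true, -1) := by
          rw [hAr, hA3, aLoop_title nt x r2 (p.length + 1 + q.length) hdx' htx]
        have hB4 : lineB nt lines 0 false false lines =
            PySem.Str.join "\n" (lines.take (p.length + 1 + q.length) ++
              ("title: " ++ nt) :: lines.drop (p.length + 1 + q.length + 1)) := by
          rw [hB3, lineB, if_neg (by simp [hdx']), if_pos (by simp [htx])]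
        have hdropc2 : lines.drop (p.length + 1 + q.length + 1) = r2 := by
          rw [hlines, hrest]
          have h4 : p ++ d :: (q ++ x :: r2) = (p ++ d :: q ++ [x]) ++ r2 := by simp
          rw [h4, List.drop_left' (by simp; omega)]
        rw [hB4, htakec, hdropc2]
        simp only [hA4]
        rw [if_neg (by simp)]
        congr 1
        simp

lemma join_cons_ne (c : List Char) (t : List (List Char)) (ht : t ≠ []) :
    PySem.Chars.join ['\n'] (c :: t) = c ++ '\n' :: PySem.Chars.join ['\n'] t := by
  cases t with
  | nil => exact absurd rfl ht
  | cons q rest =>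
    rw [PySem.Chars.join_cons_cons]
    simp

lemma join_append_ne (A B : List (List Char)) (hA : A ≠ []) (hB : B ≠ []) :
    PySem.Chars.join ['\n'] (A ++ B) =
      PySem.Chars.join ['\n'] A ++ '\n' :: PySem.Chars.join ['\n'] B := by
  induction A with
  | nil => exact absurd rfl hA
  | cons a A' ih =>
    by_cases h : A' = []
    · subst h
      rw [List.cons_append, List.nil_append, join_cons_ne _ _ hB, PySem.Chars.join_singleton]
    · rw [List.cons_append, join_cons_ne _ _ (by simp [h]), ih (by simp [h]), join_cons_ne _ _ h]
      simp


-- ---------- chunk decomposition of a character string ----------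

def chunksAux (pre : List Char) : List Char → List (List Char)
  | [] => [pre]
  | c :: t => if c = '\n' then pre :: chunksAux [] t else chunksAux (pre ++ [c]) t

def chunksOf (cs : List Char) : List (List Char) := chunksAux [] cs

lemma chunksAux_ne_nil (pre l : List Char) : chunksAux pre l ≠ [] := by
  induction l generalizing pre with
  | nil => simp [chunksAux]
  | cons c t ih =>
    by_cases h : c = '\n'
    · simp [chunksAux, h]
    · simpa [chunksAux, h] using ih (pre ++ [c])

lemma join_chunksAux (pre l : List Char) :
    PySem.Chars.join ['\n'] (chunksAux pre l) = pre ++ l := by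
  induction l generalizing pre with
  | nil => simp [chunksAux, PySem.Chars.join_singleton]
  | cons c t ih =>
    by_cases h : c = '\n'
    · rw [chunksAux, if_pos h, join_cons_ne _ _ (chunksAux_ne_nil [] t), ih []]
      simp [h]
    · rw [chunksAux, if_neg h, ih (pre ++ [c])]
      simp

lemma chunksAux_clean (pre l : List Char) (hpre : '\n' ∉ pre) :
    ∀ c ∈ chunksAux pre l, '\n' ∉ c := by
  induction l generalizing pre with
  | nil => simpa [chunksAux] using hpre
  | cons c t ih =>
    by_cases h : c = '\n'
    · rw [chunksAux, if_pos h]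
      intro x hx
      rcases List.mem_cons.mp hx with h1 | h1
      · subst h1; exact hpre
      · exact ih [] (by simp) x h1
    · rw [chunksAux, if_neg h]
      exact ih (pre ++ [c]) (by simp [hpre, Ne.symm h])

lemma go_spec (fuel : Nat) : ∀ (l cur : List Char) (acc : List (List Char)), l.length < fuel →
    PySem.Chars.splitOn.go ['\n'] fuel l cur acc = acc.reverse ++ chunksAux cur.reverse l := by
  induction fuel with
  | zero => intro l cur acc h; omega
  | succ f ih =>
    intro l cur acc h
    cases l with
    | nil => simp [PySem.Chars.splitOn.go, chunksAux]
    | cons c rest =>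
      rw [PySem.Chars.splitOn.go]
      by_cases hc : c = '\n'
      · rw [if_pos (by simp [hc, List.isPrefixOf])]
        simp only [List.length_cons, List.length_nil, Nat.zero_add, List.drop_succ_cons,
          List.drop_zero]
        rw [ih rest [] (cur.reverse :: acc) (by simpa using Nat.lt_of_succ_lt_succ h)]
        simp [chunksAux, hc]
      · rw [if_neg (by simp [List.isPrefixOf]; exact fun he => hc he.symm)]
        rw [ih rest (c :: cur) acc (by simpa using Nat.lt_of_succ_lt_succ h)]
        simp [chunksAux, hc]

lemma splitOn_eq_chunks (cs : List Char) :
    PySem.Chars.splitOn cs ['\n'] = chunksOf cs := by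
  show PySem.Chars.splitOn.go _ _ _ _ _ = _
  rw [go_spec (cs.length + 1) cs [] [] (by omega)]
  simp [chunksOf]

lemma map_ofList_toList (ls : List String) :
    List.map (String.ofList ∘ String.toList) ls = ls := by
  induction ls with
  | nil => rfl
  | cons a t ih => simp only [List.map_cons, ih, Function.comp_apply, String.ofList_toList]

lemma split_eq (content : String) :
    PySem.Str.split? content "\n" = some ((chunksOf content.toList).map String.ofList) := by
  have h := PySem.Str.split?_map content "\n"
  have h2 : PySem.Chars.split? content.toList "\n".toList =
      some (chunksOf content.toList) := by
    rw [show ("\n" : String).toList = ['\n'] from rfl]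
    rw [PySem.Chars.split?]
    rw [if_neg (by simp)]
    rw [splitOn_eq_chunks]
  rw [h2] at h
  cases hx : PySem.Str.split? content "\n" with
  | none => rw [hx] at h; simp at h
  | some ls =>
    rw [hx] at h
    simp only [Option.map_some, Option.some.injEq] at h
    congr 1
    have := congrArg (List.map String.ofList) h
    rw [List.map_map] at this
    rw [← this]
    rw [map_ofList_toList]

-- ---------- join helpers ----------

lemma toList_J (M : List (List Char)) :
    (PySem.Str.join "\n" (M.map String.ofList)).toList = PySem.Chars.join ['\n'] M := by
  show (String.ofList _).toList = _
  rw [String.toList_ofList]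
  have : ("\n" : String).toList = ['\n'] := rfl
  rw [this]
  congr 1
  rw [List.map_map]
  induction M with
  | nil => rfl
  | cons a t ih => simp only [List.map_cons, ih, Function.comp_apply, String.toList_ofList]

-- start offset of line number M.length, M being the preceding lines
def off (M : List (List Char)) : Nat :=
  if M = [] then 0 else (PySem.Chars.join ['\n'] M).length + 1

lemma take_off (P R : List (List Char)) (hR : R ≠ []) :
    (PySem.Chars.join ['\n'] (P ++ R)).take (off P) =
      (if P = [] then [] else PySem.Chars.join ['\n'] P ++ ['\n']) := by
  by_cases hP : P = []
  · simp [hP, off]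
  · rw [if_neg hP, join_append_ne P R hP hR, off, if_neg hP]
    have : PySem.Chars.join ['\n'] P ++ '\n' :: PySem.Chars.join ['\n'] R
        = (PySem.Chars.join ['\n'] P ++ ['\n']) ++ PySem.Chars.join ['\n'] R := by simp
    rw [this, List.take_left' (by simp)]

lemma drop_off (P R : List (List Char)) (hR : R ≠ []) :
    (PySem.Chars.join ['\n'] (P ++ R)).drop (off P) = PySem.Chars.join ['\n'] R := by
  by_cases hP : P = []
  · simp [hP, off]
  · rw [join_append_ne P R hP hR, off, if_neg hP]
    have : PySem.Chars.join ['\n'] P ++ '\n' :: PySem.Chars.join ['\n'] R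
        = (PySem.Chars.join ['\n'] P ++ ['\n']) ++ PySem.Chars.join ['\n'] R := by simp
    rw [this, List.drop_left' (by simp)]

lemma insert_join (tc : List Char) (P R : List (List Char)) (hR : R ≠ []) :
    (PySem.Chars.join ['\n'] (P ++ R)).take (off P) ++ tc ++
        '\n' :: (PySem.Chars.join ['\n'] (P ++ R)).drop (off P) =
      PySem.Chars.join ['\n'] (P ++ tc :: R) := by
  rw [take_off P R hR, drop_off P R hR]
  by_cases hP : P = []
  · simp [hP, join_cons_ne tc R hR]
  · rw [if_neg hP, join_append_ne P (tc :: R) hP (by simp), join_cons_ne tc R hR]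
    simp

lemma replace_join (tc c : List Char) (P R : List (List Char)) :
    (PySem.Chars.join ['\n'] (P ++ c :: R)).take (off P) ++ tc ++
        (if R = [] then [] else '\n' :: PySem.Chars.join ['\n'] R) =
      PySem.Chars.join ['\n'] (P ++ tc :: R) := by
  rw [take_off P (c :: R) (by simp)]
  by_cases hP : P = []
  · by_cases hR : R = []
    · simp [hP, hR, PySem.Chars.join_singleton]
    · simp [hP, hR, join_cons_ne tc R hR]
  · by_cases hR : R = []
    · rw [if_neg hP, if_pos hR, join_append_ne P (tc :: R) hP (by simp), hR,
        PySem.Chars.join_singleton]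
      simp
    · rw [if_neg hP, if_neg hR, join_append_ne P (tc :: R) hP (by simp), join_cons_ne tc R hR]
      simp

-- ---------- find lemmas ----------

lemma find_go_clean (t : List Char) : ∀ (c : List Char) (j : Nat), '\n' ∉ c →
    PySem.Chars.find.go ['\n'] (c ++ '\n' :: t) j = ((j : Int) + c.length) := by
  intro c
  induction c with
  | nil =>
    intro j h
    rw [List.nil_append, PySem.Chars.find.go]
    rw [if_pos (by simp [List.isPrefixOf])]
    simp
  | cons a c' ih =>
    intro j h
    rw [List.cons_append, PySem.Chars.find.go]
    rw [if_neg (by simp [List.isPrefixOf]; exact fun he => h (by simp [he.symm]))]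
    rw [ih (j+1) (fun hm => h (by simp [hm]))]
    simp [List.length_cons]; ring

lemma find_clean (c : List Char) (hc : '\n' ∉ c) : PySem.Chars.find c ['\n'] = -1 := by
  rw [PySem.Chars.find_eq_neg_one_iff]
  intro hin
  exact hc (hin.subset (by simp))

lemma find_append_newline (c t : List Char) (hc : '\n' ∉ c) :
    PySem.Chars.find (c ++ '\n' :: t) ['\n'] = (c.length : Int) := by
  show PySem.Chars.find.go _ _ _ = _
  rw [find_go_clean t c 0 hc]
  simp

-- ---------- Str/Chars bridges on a chunk ----------

lemma dash_bridge (c : List Char) :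
    isDash (String.ofList c) = (PySem.Chars.strip c == "---".toList) := by
  unfold isDash
  rw [Bool.eq_iff_iff]
  simp [beq_iff_eq, ← String.toList_inj, PySem.Str.toList_strip]

lemma title_bridge (c : List Char) :
    isTitle (String.ofList c) = PySem.Chars.startswith c "title:".toList := by
  unfold isTitle
  rw [PySem.Str.startswith_eq, String.toList_ofList]

lemma tS_bridge (c : List Char) :
    tS (String.ofList c) = PySem.Chars.startswith (PySem.Chars.strip c) "title:".toList := by
  unfold tS
  rw [PySem.Str.startswith_eq, PySem.Str.toList_strip, String.toList_ofList]

lemma off_snoc (M : List (List Char)) (c : List Char) :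
    off (M ++ [c]) = off M + c.length + 1 := by
  by_cases hM : M = []
  · simp [hM, off, PySem.Chars.join_singleton]
  · rw [off, off, if_neg hM, if_neg (by simp), join_append_ne M [c] hM (by simp),
      PySem.Chars.join_singleton]
    simp [Nat.add_comm, Nat.add_assoc, Nat.add_left_comm]

lemma bLoop_last (nt cs rest : List Char) (pos prev : Nat) (opened seen : Bool)
    (hk : PySem.Chars.find rest ['\n'] = -1) :
    bLoop nt cs pos prev opened seen rest =
      (if PySem.Chars.strip rest == "---".toList then
        if opened then
          if seen then cs
          else cs.take prev ++ ("title: ".toList ++ nt ++ ['\n']) ++ cs.drop prev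
        else cs
      else if opened && PySem.Chars.startswith rest "title:".toList then
        cs.take pos ++ ("title: ".toList ++ nt)
      else cs) := by
  rw [bLoop]
  simp only [hk, reduceIte, dite_eq_ite]
  simp

lemma bLoop_step (nt cs c t : List Char) (pos prev : Nat) (opened seen : Bool)
    (hk : PySem.Chars.find (c ++ '\n' :: t) ['\n'] = (c.length : Int)) :
    bLoop nt cs pos prev opened seen (c ++ '\n' :: t) =
      (if PySem.Chars.strip c == "---".toList then
        if opened then
          if seen then cs
          else cs.take prev ++ ("title: ".toList ++ nt ++ ['\n']) ++ cs.drop prev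
        else bLoop nt cs (pos + c.length + 1) pos true
          (seen || PySem.Chars.startswith (PySem.Chars.strip c) "title:".toList) t
      else if opened && PySem.Chars.startswith c "title:".toList then
        cs.take pos ++ ("title: ".toList ++ nt) ++ '\n' :: t
      else bLoop nt cs (pos + c.length + 1) pos opened
        (seen || PySem.Chars.startswith (PySem.Chars.strip c) "title:".toList) t) := by
  have hne : (c.length : Int) ≠ -1 := by omega
  have htk : List.take c.length (c ++ '\n' :: t) = c := List.take_left' rfl
  have hdr : List.drop (c.length + 1) (c ++ '\n' :: t) = t := by
    have h5 : c ++ '\n' :: t = (c ++ ['\n']) ++ t := by simp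
    rw [h5]
    exact List.drop_left' (by simp)
  have hdr2 : List.drop c.length (c ++ '\n' :: t) = '\n' :: t := List.drop_left' rfl
  rw [bLoop]
  simp only [hk, hne, reduceIte, dite_eq_ite, Int.toNat_natCast, htk, hdr, hdr2]

-- ---------- Step 1: bLoop equals lineB on the chunk decomposition ----------


lemma step1 (nt : String) (Lall : List (List Char)) (L2 : List (List Char)) :
    ∀ (L1 : List (List Char)) (opened seen : Bool),
    Lall = L1 ++ L2 → L2 ≠ [] → (∀ c ∈ Lall, '\n' ∉ c) →
    bLoop nt.toList (PySem.Chars.join ['\n'] Lall) (off L1) (off L1.dropLast) opened seen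
        (PySem.Chars.join ['\n'] L2) =
      (lineB nt (Lall.map String.ofList) L1.length opened seen (L2.map String.ofList)).toList := by
  induction L2 with
  | nil => intro L1 opened seen hL hne hclean; exact absurd rfl hne
  | cons c L2' ih =>
    intro L1 opened seen hL hne hclean
    have hcc : '\n' ∉ c := hclean c (by rw [hL]; simp)
    have hLne : Lall ≠ [] := by rw [hL]; simp
    have htc : ("title: " ++ nt).toList = "title: ".toList ++ nt.toList := by simp
    have htake1 : Lall.take L1.length = L1 := by rw [hL]; exact List.take_left' rfl
    have hins : ∀ (P R : List (List Char)), Lall = P ++ R → R ≠ [] →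
        (PySem.Chars.join ['\n'] Lall).take (off P) ++
            ("title: ".toList ++ nt.toList ++ ['\n']) ++
            (PySem.Chars.join ['\n'] Lall).drop (off P) =
          (PySem.Str.join "\n" ((P.map String.ofList) ++
            ("title: " ++ nt) :: (R.map String.ofList))).toList := by
      intro P R hPR hR
      have h6 : (P.map String.ofList) ++ ("title: " ++ nt) :: (R.map String.ofList)
          = (P ++ ("title: " ++ nt).toList :: R).map String.ofList := by
        simp only [List.map_append, List.map_cons, String.ofList_toList]
      rw [h6, toList_J, hPR]
      rw [← insert_join (("title: " ++ nt).toList) P R hR, htc]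
      simp
    by_cases h2 : L2' = []
    · subst h2
      have hLall : Lall = L1 ++ [c] := hL
      have hjr : PySem.Chars.join ['\n'] [c] = c := PySem.Chars.join_singleton _ _
      have hk : PySem.Chars.find c ['\n'] = -1 := find_clean c hcc
      rw [hjr, bLoop_last _ _ _ _ _ _ _ hk]
      show _ = (lineB nt (Lall.map String.ofList) L1.length opened seen
        (String.ofList c :: [])).toList
      rw [lineB]
      simp only [dash_bridge, title_bridge, tS_bridge, List.isEmpty_nil, if_true]
      split_ifs with h3 h4 h5
      · exact (toList_J Lall).symm
      · -- insert before previous line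
        have hform : (Lall.map String.ofList).take (L1.length - 1)
              ++ ("title: " ++ nt) :: (Lall.map String.ofList).drop (L1.length - 1)
            = (Lall.take (L1.length - 1)).map String.ofList
              ++ ("title: " ++ nt) :: (Lall.drop (L1.length - 1)).map String.ofList := by
          simp [List.map_take, List.map_drop]
        rw [hform]
        by_cases hL1 : L1 = []
        · subst hL1
          have := hins [] Lall (by simp) hLne
          simpa [off] using this
        · obtain ⟨P, y, hPy⟩ : ∃ P y, L1 = P ++ [y] :=
            ⟨L1.dropLast, L1.getLast hL1, (List.dropLast_append_getLast hL1).symm⟩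
          have hdl : L1.dropLast = P := by rw [hPy]; simp
          have hlen1 : L1.length - 1 = P.length := by rw [hPy]; simp
          have hsplitA : Lall = P ++ (y :: [c]) := by rw [hLall, hPy]; simp
          have htkP : Lall.take P.length = P := by rw [hsplitA]; exact List.take_left' rfl
          have hdrP : Lall.drop P.length = y :: [c] := by
            rw [hsplitA]; exact List.drop_left' rfl
          rw [hdl, hlen1, htkP, hdrP]
          exact hins P (y :: [c]) hsplitA (by simp)
      · exact (toList_J Lall).symm
      · -- replace the title line (last line, nothing after)
        have hform : (Lall.map String.ofList).take L1.length
              ++ ("title: " ++ nt) :: (Lall.map String.ofList).drop (L1.length + 1)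
            = (Lall.take L1.length).map String.ofList
              ++ ("title: " ++ nt) :: (Lall.drop (L1.length + 1)).map String.ofList := by
          simp [List.map_take, List.map_drop]
        have hdr1 : Lall.drop (L1.length + 1) = [] := by
          rw [hLall]
          apply List.drop_eq_nil_of_le
          simp
        rw [hform, htake1, hdr1]
        simp only [List.map_nil]
        have h6 : (L1.map String.ofList) ++ ("title: " ++ nt) :: ([] : List String)
            = (L1 ++ [("title: " ++ nt).toList]).map String.ofList := by
          simp only [List.map_append, List.map_cons, List.map_nil, String.ofList_toList]
        rw [h6, toList_J, hLall]
        rw [← replace_join (("title: " ++ nt).toList) c L1 [], htc]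
        simp
      · exact (toList_J Lall).symm
    · -- a newline follows: one step then induction
      have hLall2 : Lall = (L1 ++ [c]) ++ L2' := by rw [hL]; simp
      have hjr : PySem.Chars.join ['\n'] (c :: L2') = c ++ '\n' :: PySem.Chars.join ['\n'] L2' :=
        join_cons_ne c L2' h2
      have hk : PySem.Chars.find (c ++ '\n' :: PySem.Chars.join ['\n'] L2') ['\n']
          = (c.length : Int) := find_append_newline _ _ hcc
      rw [hjr, bLoop_step _ _ _ _ _ _ _ _ hk]
      show _ = (lineB nt (Lall.map String.ofList) L1.length opened seen
        (String.ofList c :: L2'.map String.ofList)).toList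
      rw [lineB]
      have hie : (L2'.map String.ofList).isEmpty = false := by
        simp [List.isEmpty_eq_false_iff, h2]
      simp only [dash_bridge, title_bridge, tS_bridge, hie, Bool.false_eq_true, if_false]
      have hrec : ∀ op' : Bool, ∀ sn' : Bool,
          bLoop nt.toList (PySem.Chars.join ['\n'] Lall) (off L1 + c.length + 1) (off L1)
              op' sn' (PySem.Chars.join ['\n'] L2')
            = (lineB nt (Lall.map String.ofList) (L1.length + 1) op' sn'
                (L2'.map String.ofList)).toList := by
        intro op' sn'
        have := ih (L1 ++ [c]) op' sn' hLall2 h2 hclean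
        rw [off_snoc, List.dropLast_concat] at this
        simpa using this
      split_ifs with h3 h4 h5
      · exact (toList_J Lall).symm
      · -- insert before previous line
        have hform : (Lall.map String.ofList).take (L1.length - 1)
              ++ ("title: " ++ nt) :: (Lall.map String.ofList).drop (L1.length - 1)
            = (Lall.take (L1.length - 1)).map String.ofList
              ++ ("title: " ++ nt) :: (Lall.drop (L1.length - 1)).map String.ofList := by
          simp [List.map_take, List.map_drop]
        rw [hform]
        by_cases hL1 : L1 = []
        · subst hL1
          have := hins [] Lall (by simp) hLne
          simpa [off] using this
        · obtain ⟨P, y, hPy⟩ : ∃ P y, L1 = P ++ [y] :=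
            ⟨L1.dropLast, L1.getLast hL1, (List.dropLast_append_getLast hL1).symm⟩
          have hdl : L1.dropLast = P := by rw [hPy]; simp
          have hlen1 : L1.length - 1 = P.length := by rw [hPy]; simp
          have hsplitA : Lall = P ++ (y :: c :: L2') := by rw [hL, hPy]; simp
          have htkP : Lall.take P.length = P := by rw [hsplitA]; exact List.take_left' rfl
          have hdrP : Lall.drop P.length = y :: c :: L2' := by
            rw [hsplitA]; exact List.drop_left' rfl
          rw [hdl, hlen1, htkP, hdrP]
          exact hins P (y :: c :: L2') hsplitA (by simp)
      · exact hrec true _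
      · -- replace the title line; '\n' :: join L2' follows
        have hform : (Lall.map String.ofList).take L1.length
              ++ ("title: " ++ nt) :: (Lall.map String.ofList).drop (L1.length + 1)
            = (Lall.take L1.length).map String.ofList
              ++ ("title: " ++ nt) :: (Lall.drop (L1.length + 1)).map String.ofList := by
          simp [List.map_take, List.map_drop]
        have hdr1 : Lall.drop (L1.length + 1) = L2' := by
          rw [hLall2]
          have : (L1 ++ [c]).length = L1.length + 1 := by simp
          rw [← this]
          exact List.drop_left' rfl
        rw [hform, htake1, hdr1]
        have h6 : (L1.map String.ofList) ++ ("title: " ++ nt) :: (L2'.map String.ofList)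
            = (L1 ++ ("title: " ++ nt).toList :: L2').map String.ofList := by
          simp only [List.map_append, List.map_cons, String.ofList_toList]
        rw [h6, toList_J, hL]
        rw [← replace_join (("title: " ++ nt).toList) c L1 L2', htc]
        simp [h2]
      · exact hrec opened _

-- ===== VERDICT (by name: the statement is the Claim_ definition above) =====
theorem update_front_matter_spec : Claim_equal_update_front_matter := by
  intro content new_title _
  unfold Spec_update_front_matter
  have hA : update_front_matter content new_title =
      lineB new_title ((chunksOf content.toList).map String.ofList) 0 false false
        ((chunksOf content.toList).map String.ofList) := by
    unfold update_front_matter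
    rw [split_eq content]
    exact core2 new_title _
  have h1 := step1 new_title (chunksOf content.toList) (chunksOf content.toList) [] false false
    (by simp) (chunksAux_ne_nil [] content.toList) (chunksAux_clean [] content.toList (by simp))
  rw [show PySem.Chars.join ['\n'] (chunksOf content.toList) = content.toList from by
    simpa [chunksOf] using join_chunksAux [] content.toList] at h1
  simp only [List.dropLast_nil, show off ([] : List (List Char)) = 0 from by simp [off],
    List.length_nil] at h1
  rw [hA]
  unfold update_front_matter_alt
  apply String.toList_inj.mp
  rw [String.toList_ofList, ← h1]
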